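-- pv_equiv track=rewrite | github.com/fancifulland2718/gswarp | _warp_backend.py | _get_sm_architecture_props
-- ===== SOURCE A (Python) =====
-- _SM_ARCHITECTURE_PROPS: dict[tuple[int, int], dict[str, int]] = {
--     # Volta
--     (7, 0): {"regs_per_sm": 65536, "max_warps_per_sm": 64, "max_blocks_per_sm": 32, "shared_mem_per_sm_bytes": 98304, "l2_cache_bytes": 6291456, "reg_alloc_unit": 256},
--     # Turing
--     (7, 5): {"regs_per_sm": 65536, "max_warps_per_sm": 32, "max_blocks_per_sm": 16, "shared_mem_per_sm_bytes": 65536, "l2_cache_bytes": 4194304, "reg_alloc_unit": 256},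
--     # Ampere GA100
--     (8, 0): {"regs_per_sm": 65536, "max_warps_per_sm": 64, "max_blocks_per_sm": 32, "shared_mem_per_sm_bytes": 167936, "l2_cache_bytes": 41943040, "reg_alloc_unit": 256},
--     # Ampere GA10x
--     (8, 6): {"regs_per_sm": 65536, "max_warps_per_sm": 48, "max_blocks_per_sm": 16, "shared_mem_per_sm_bytes": 102400, "l2_cache_bytes": 4194304, "reg_alloc_unit": 256},
--     # Ada Lovelace
--     (8, 9): {"regs_per_sm": 65536, "max_warps_per_sm": 48, "max_blocks_per_sm": 24, "shared_mem_per_sm_bytes": 102400, "l2_cache_bytes": 33554432, "reg_alloc_unit": 256},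
--     # Hopper
--     (9, 0): {"regs_per_sm": 65536, "max_warps_per_sm": 64, "max_blocks_per_sm": 32, "shared_mem_per_sm_bytes": 233472, "l2_cache_bytes": 52428800, "reg_alloc_unit": 256},
--     # Blackwell
--     (10, 0): {"regs_per_sm": 65536, "max_warps_per_sm": 64, "max_blocks_per_sm": 32, "shared_mem_per_sm_bytes": 233472, "l2_cache_bytes": 67108864, "reg_alloc_unit": 256},
-- }
--
-- def _get_sm_architecture_props(major: int, minor: int) -> dict[str, int] | None:
--     """Look up SM architecture constants by compute capability.
--
--     Falls back to the nearest lower architecture if the exact (major, minor) is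
--     not in the table."""
--     props = _SM_ARCHITECTURE_PROPS.get((major, minor))
--     if props is not None:
--         return dict(props)
--     for (m, n), p in sorted(_SM_ARCHITECTURE_PROPS.items(), reverse=True):
--         if m <= major:
--             return dict(p)
--     return None
-- ===== SOURCE B (Python) =====
-- _SM_ARCHITECTURE_PROPS = {
--     (7, 0): {"regs_per_sm": 65536, "max_warps_per_sm": 64, "max_blocks_per_sm": 32, "shared_mem_per_sm_bytes": 98304, "l2_cache_bytes": 6291456, "reg_alloc_unit": 256},
--     (7, 5): {"regs_per_sm": 65536, "max_warps_per_sm": 32, "max_blocks_per_sm": 16, "shared_mem_per_sm_bytes": 65536, "l2_cache_bytes": 4194304, "reg_alloc_unit": 256},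
--     (8, 0): {"regs_per_sm": 65536, "max_warps_per_sm": 64, "max_blocks_per_sm": 32, "shared_mem_per_sm_bytes": 167936, "l2_cache_bytes": 41943040, "reg_alloc_unit": 256},
--     (8, 6): {"regs_per_sm": 65536, "max_warps_per_sm": 48, "max_blocks_per_sm": 16, "shared_mem_per_sm_bytes": 102400, "l2_cache_bytes": 4194304, "reg_alloc_unit": 256},
--     (8, 9): {"regs_per_sm": 65536, "max_warps_per_sm": 48, "max_blocks_per_sm": 24, "shared_mem_per_sm_bytes": 102400, "l2_cache_bytes": 33554432, "reg_alloc_unit": 256},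
--     (9, 0): {"regs_per_sm": 65536, "max_warps_per_sm": 64, "max_blocks_per_sm": 32, "shared_mem_per_sm_bytes": 233472, "l2_cache_bytes": 52428800, "reg_alloc_unit": 256},
--     (10, 0): {"regs_per_sm": 65536, "max_warps_per_sm": 64, "max_blocks_per_sm": 32, "shared_mem_per_sm_bytes": 233472, "l2_cache_bytes": 67108864, "reg_alloc_unit": 256},
-- }
--
--
-- def _get_sm_architecture_props(major: int, minor: int) -> dict[str, int] | None:
--     """Look up SM architecture constants by compute capability.
--
--     Falls back to the nearest lower architecture if the exact (major, minor) is
--     not in the table."""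
--     best_key = None
--     best_props = None
--     for k, p in _SM_ARCHITECTURE_PROPS.items():
--         if k == (major, minor):
--             return dict(p)
--         if k[0] <= major and (best_key is None or best_key < k):
--             best_key = k
--             best_props = p
--     return None if best_props is None else dict(best_props)
-- ===== Notes on version B (the rewrite author's own statement) =====
-- stated objective: alternative
-- what changed: Replaces the dict .get fast-path plus reverse-sort-then-scan fallback by a single pass over the table items that returns on an exact key match and otherwise tracks the lexicographically largest key with k[0] <= major in an accumulator.
import Mathlib
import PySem

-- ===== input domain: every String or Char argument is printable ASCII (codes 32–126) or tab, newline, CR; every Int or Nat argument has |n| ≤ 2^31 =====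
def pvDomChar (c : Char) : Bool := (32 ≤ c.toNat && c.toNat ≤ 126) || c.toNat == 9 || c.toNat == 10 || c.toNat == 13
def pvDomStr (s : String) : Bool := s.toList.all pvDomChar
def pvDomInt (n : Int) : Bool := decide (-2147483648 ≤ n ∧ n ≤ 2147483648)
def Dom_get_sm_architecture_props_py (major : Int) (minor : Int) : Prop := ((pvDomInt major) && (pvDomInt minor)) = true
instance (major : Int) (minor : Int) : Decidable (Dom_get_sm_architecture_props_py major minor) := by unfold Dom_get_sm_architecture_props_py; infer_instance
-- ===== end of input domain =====

-- B replaces A's dict-get fast path + reverse-sort-then-scan fallback with ONE pass over the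
-- table items, returning on an exact key match and otherwise keeping the lexicographically
-- largest key with k[0] <= major in an accumulator (objective: alternative, no sort).

-- The module constant _SM_ARCHITECTURE_PROPS as an association list (dict in insertion order).
def pvSMProps : List ((Int × Int) × List (String × Int)) := [
  ((7, 0), [("regs_per_sm", 65536), ("max_warps_per_sm", 64), ("max_blocks_per_sm", 32), ("shared_mem_per_sm_bytes", 98304), ("l2_cache_bytes", 6291456), ("reg_alloc_unit", 256)]),
  ((7, 5), [("regs_per_sm", 65536), ("max_warps_per_sm", 32), ("max_blocks_per_sm", 16), ("shared_mem_per_sm_bytes", 65536), ("l2_cache_bytes", 4194304), ("reg_alloc_unit", 256)]),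
  ((8, 0), [("regs_per_sm", 65536), ("max_warps_per_sm", 64), ("max_blocks_per_sm", 32), ("shared_mem_per_sm_bytes", 167936), ("l2_cache_bytes", 41943040), ("reg_alloc_unit", 256)]),
  ((8, 6), [("regs_per_sm", 65536), ("max_warps_per_sm", 48), ("max_blocks_per_sm", 16), ("shared_mem_per_sm_bytes", 102400), ("l2_cache_bytes", 4194304), ("reg_alloc_unit", 256)]),
  ((8, 9), [("regs_per_sm", 65536), ("max_warps_per_sm", 48), ("max_blocks_per_sm", 24), ("shared_mem_per_sm_bytes", 102400), ("l2_cache_bytes", 33554432), ("reg_alloc_unit", 256)]),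
  ((9, 0), [("regs_per_sm", 65536), ("max_warps_per_sm", 64), ("max_blocks_per_sm", 32), ("shared_mem_per_sm_bytes", 233472), ("l2_cache_bytes", 52428800), ("reg_alloc_unit", 256)]),
  ((10, 0), [("regs_per_sm", 65536), ("max_warps_per_sm", 64), ("max_blocks_per_sm", 32), ("shared_mem_per_sm_bytes", 233472), ("l2_cache_bytes", 67108864), ("reg_alloc_unit", 256)])]

-- ===== PORT A =====
-- _SM_ARCHITECTURE_PROPS.get((major, minor)): first key match in the association list.
def pvGetA (k : Int × Int) : List ((Int × Int) × List (String × Int)) → Option (List (String × Int))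
  | [] => none
  | (k', v) :: rest => if k' = k then some v else pvGetA k rest

-- A's 'for (m, n), p in sorted(_SM_ARCHITECTURE_PROPS.items(), reverse=True): if m <= major: return dict(p)'.
def pvFindFallbackA (major : Int) : List ((Int × Int) × List (String × Int)) → Option (List (String × Int))
  | [] => none
  | (k, p) :: rest => if k.1 ≤ major then some p else pvFindFallbackA major rest

-- sorted(items, reverse=True): Python compares the items as tuples; the keys are pairwise distinct,
-- so the comparison never reaches the value dicts — sorted2 on the key pair is exact here.
def get_sm_architecture_props_py (major : Int) (minor : Int) : Option (List (String × Int)) :=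
  match pvGetA (major, minor) pvSMProps with
  | some p => some p
  | none =>
    pvFindFallbackA major (PySem.List.sorted2 pvSMProps (fun it => it.1.1) (fun it => it.1.2) true)

-- ===== PORT B =====
-- Python's 'best_key < k' on int pairs is lexicographic comparison.
def pvKeyLt (a b : Int × Int) : Bool := a.1 < b.1 || (a.1 == b.1 && a.2 < b.2)

-- B's single loop: return on exact match, else keep the largest qualifying (key, props) seen.
def pvScanB (major : Int) (minor : Int) :
    Option ((Int × Int) × List (String × Int)) → List ((Int × Int) × List (String × Int)) →
    Option (List (String × Int))
  | best, [] => best.map (fun bp => bp.2)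
  | best, (k, p) :: rest =>
    if k = (major, minor) then some p
    else if decide (k.1 ≤ major) && (match best with | none => true | some (bk, _) => pvKeyLt bk k) then
      pvScanB major minor (some (k, p)) rest
    else pvScanB major minor best rest

def get_sm_architecture_props_py_alt (major : Int) (minor : Int) : Option (List (String × Int)) :=
  pvScanB major minor none pvSMProps

-- ===== PRECONDITION & SPEC =====
def Spec_get_sm_architecture_props_py (major : Int) (minor : Int) (out : Option (List (String × Int))) : Prop := out = get_sm_architecture_props_py_alt major minor
instance (major : Int) (minor : Int) (out : Option (List (String × Int))) : Decidable (Spec_get_sm_architecture_props_py major minor out) := by unfold Spec_get_sm_architecture_props_py; infer_instance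

-- ===== CLAIM (what is proved, stated in full; the proofs are below) =====
def Claim_equal_get_sm_architecture_props_py : Prop := ∀ (major : Int) (minor : Int), Dom_get_sm_architecture_props_py major minor → Spec_get_sm_architecture_props_py major minor (get_sm_architecture_props_py major minor)

-- ===== LEMMAS AND PROOFS =====

-- sorted(items, reverse=True) of the concrete table, evaluated once.
lemma sortedEq : PySem.List.sorted2 pvSMProps (fun it => it.1.1) (fun it => it.1.2) true = [
  (((10:Int), (0:Int)), [("regs_per_sm", (65536:Int)), ("max_warps_per_sm", 64), ("max_blocks_per_sm", 32), ("shared_mem_per_sm_bytes", 233472), ("l2_cache_bytes", 67108864), ("reg_alloc_unit", 256)]),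
  ((9, 0), [("regs_per_sm", 65536), ("max_warps_per_sm", 64), ("max_blocks_per_sm", 32), ("shared_mem_per_sm_bytes", 233472), ("l2_cache_bytes", 52428800), ("reg_alloc_unit", 256)]),
  ((8, 9), [("regs_per_sm", 65536), ("max_warps_per_sm", 48), ("max_blocks_per_sm", 24), ("shared_mem_per_sm_bytes", 102400), ("l2_cache_bytes", 33554432), ("reg_alloc_unit", 256)]),
  ((8, 6), [("regs_per_sm", 65536), ("max_warps_per_sm", 48), ("max_blocks_per_sm", 16), ("shared_mem_per_sm_bytes", 102400), ("l2_cache_bytes", 4194304), ("reg_alloc_unit", 256)]),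
  ((8, 0), [("regs_per_sm", 65536), ("max_warps_per_sm", 64), ("max_blocks_per_sm", 32), ("shared_mem_per_sm_bytes", 167936), ("l2_cache_bytes", 41943040), ("reg_alloc_unit", 256)]),
  ((7, 5), [("regs_per_sm", 65536), ("max_warps_per_sm", 32), ("max_blocks_per_sm", 16), ("shared_mem_per_sm_bytes", 65536), ("l2_cache_bytes", 4194304), ("reg_alloc_unit", 256)]),
  ((7, 0), [("regs_per_sm", 65536), ("max_warps_per_sm", 64), ("max_blocks_per_sm", 32), ("shared_mem_per_sm_bytes", 98304), ("l2_cache_bytes", 6291456), ("reg_alloc_unit", 256)])] := by decide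

-- ===== VERDICT (by name: the statement is the Claim_ definition above) =====
theorem get_sm_architecture_props_py_spec : Claim_equal_get_sm_architecture_props_py := by
  intro major minor _
  unfold Spec_get_sm_architecture_props_py
  unfold get_sm_architecture_props_py get_sm_architecture_props_py_alt
  rw [sortedEq]
  by_cases h7 : major ≤ 6
  · have n7 : ¬((7:Int) = major) := by omega
    have n8 : ¬((8:Int) = major) := by omega
    have n9 : ¬((9:Int) = major) := by omega
    have n10 : ¬((10:Int) = major) := by omega
    have l7 : ¬((7:Int) ≤ major) := by omega
    have l8 : ¬((8:Int) ≤ major) := by omega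
    have l9 : ¬((9:Int) ≤ major) := by omega
    have l10 : ¬((10:Int) ≤ major) := by omega
    norm_num [pvGetA, pvFindFallbackA, pvScanB, pvSMProps, pvKeyLt, Prod.mk.injEq, n7, n8, n9, n10, l7, l8, l9, l10]
  · by_cases e7 : major = 7
    · subst e7
      by_cases m0 : minor = 0
      · subst m0; decide
      · by_cases m5 : minor = 5
        · subst m5; decide
        · have n0 : ¬((0:Int) = minor) := by omega
          have n5 : ¬((5:Int) = minor) := by omega
          norm_num [pvGetA, pvFindFallbackA, pvScanB, pvSMProps, pvKeyLt, Prod.mk.injEq, n0, n5]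
    · by_cases e8 : major = 8
      · subst e8
        by_cases m0 : minor = 0
        · subst m0; decide
        · by_cases m6 : minor = 6
          · subst m6; decide
          · by_cases m9 : minor = 9
            · subst m9; decide
            · have n0 : ¬((0:Int) = minor) := by omega
              have n6 : ¬((6:Int) = minor) := by omega
              have n9 : ¬((9:Int) = minor) := by omega
              norm_num [pvGetA, pvFindFallbackA, pvScanB, pvSMProps, pvKeyLt, Prod.mk.injEq, n0, n6, n9]
      · by_cases e9 : major = 9
        · subst e9
          by_cases m0 : minor = 0
          · subst m0; decide
          · have n0 : ¬((0:Int) = minor) := by omega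
            norm_num [pvGetA, pvFindFallbackA, pvScanB, pvSMProps, pvKeyLt, Prod.mk.injEq, n0]
        · by_cases e10 : major = 10
          · subst e10
            by_cases m0 : minor = 0
            · subst m0; decide
            · have n0 : ¬((0:Int) = minor) := by omega
              norm_num [pvGetA, pvFindFallbackA, pvScanB, pvSMProps, pvKeyLt, Prod.mk.injEq, n0]
          · -- major ≥ 11
            have n7 : ¬((7:Int) = major) := by omega
            have n8 : ¬((8:Int) = major) := by omega
            have n9 : ¬((9:Int) = major) := by omega
            have n10 : ¬((10:Int) = major) := by omega
            have l7 : (7:Int) ≤ major := by omega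
            have l8 : (8:Int) ≤ major := by omega
            have l9 : (9:Int) ≤ major := by omega
            have l10 : (10:Int) ≤ major := by omega
            norm_num [pvGetA, pvFindFallbackA, pvScanB, pvSMProps, pvKeyLt, Prod.mk.injEq, n7, n8, n9, n10, l7, l8, l9, l10]
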